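-- pv_equiv track=rewrite | github.com/Anchovia/AnchoviaBOJ | Python/Pending/Silver/Silver4/15725.py | makeDataList
-- ===== SOURCE A (Python) =====
-- def makeDataList(polynomial):
--     polynomialList = list()
--     newPolynomial = ""
--
--     for i in range(len(polynomial)):
--         if i != 0 and polynomial[i] == "-" or polynomial[i] == "+":
--             polynomialList.append(newPolynomial)
--             newPolynomial = ""
--
--         newPolynomial += polynomial[i]
--
--     polynomialList.append(newPolynomial)
--
--     return polynomialList
-- ===== SOURCE B (Python) =====
-- def makeDataList(polynomial):
--     cuts = [0] + [i for i in range(len(polynomial))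
--                   if polynomial[i] == "+" or (i != 0 and polynomial[i] == "-")]
--     parts = [polynomial[a:b] for a, b in zip(cuts, cuts[1:])]
--     parts.append(polynomial[cuts[-1]:])
--     return parts
-- ===== Notes on version B (the rewrite author's own statement) =====
-- stated objective: alternative
-- what changed: B first collects the cut indices (0 plus every split position) in one comprehension and then builds the terms by slicing between consecutive cuts, instead of A's char-by-char string accumulation with a running term buffer.
import Mathlib
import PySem

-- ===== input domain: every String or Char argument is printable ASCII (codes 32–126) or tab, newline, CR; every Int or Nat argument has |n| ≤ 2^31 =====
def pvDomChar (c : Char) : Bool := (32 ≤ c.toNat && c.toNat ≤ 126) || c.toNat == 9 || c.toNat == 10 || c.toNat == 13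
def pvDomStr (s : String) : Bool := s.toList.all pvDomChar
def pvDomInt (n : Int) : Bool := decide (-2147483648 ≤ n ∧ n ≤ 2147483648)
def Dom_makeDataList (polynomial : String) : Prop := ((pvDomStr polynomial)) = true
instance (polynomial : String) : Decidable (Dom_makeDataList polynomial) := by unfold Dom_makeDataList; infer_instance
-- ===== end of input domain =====

-- B collects the cut indices in one pass and slices between them; A accumulates a running term
-- char by char. Same return value on every input (proved below); no claim about speed.

-- ===== PORT A =====
-- the for-loop over range(len(polynomial)) with state (polynomialList, newPolynomial);
-- strings are handled as List Char and rebuilt with String.mk at the end (exact for any string)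
def aGo (l : List Char) (i : Nat) (acc : List (List Char)) (cur : List Char) : List (List Char) :=
  match l with
  | [] => acc ++ [cur]
  | c :: rest =>
    if (i ≠ 0 ∧ c = '-') ∨ c = '+' then aGo rest (i + 1) (acc ++ [cur]) [c]
    else aGo rest (i + 1) acc (cur ++ [c])

def makeDataList (polynomial : String) : List String :=
  (aGo polynomial.toList 0 [] []).map String.mk

-- ===== PORT B =====
-- zip(cuts, cuts[1:]) + the final slice polynomial[cuts[-1]:], as a paired recursion over cuts;
-- slices polynomial[a:b] with 0 ≤ a ≤ b are exactly (drop a).take (b - a) on the char list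
def slicesB (cs : List Char) : List Nat → List (List Char)
  | [] => []
  | [a] => [cs.drop a]
  | a :: b :: rest => (cs.drop a).take (b - a) :: slicesB cs (b :: rest)

def makeDataList_alt (polynomial : String) : List String :=
  let cs := polynomial.toList
  let cuts := 0 :: (List.range cs.length).filter
      (fun i => cs.getD i ' ' == '+' || (i != 0 && (cs.getD i ' ' == '-')))
  (slicesB cs cuts).map String.mk

-- ===== PRECONDITION & SPEC =====
def Spec_makeDataList (polynomial : String) (out : List String) : Prop := out = makeDataList_alt polynomial
instance (polynomial : String) (out : List String) : Decidable (Spec_makeDataList polynomial out) := by unfold Spec_makeDataList; infer_instance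

-- ===== CLAIM (what is proved, stated in full; the proofs are below) =====
def Claim_equal_makeDataList : Prop := ∀ (polynomial : String), Dom_makeDataList polynomial → Spec_makeDataList polynomial (makeDataList polynomial)

-- ===== LEMMAS AND PROOFS =====

-- main invariant: A's loop from position j with current term = the slice cs[a:j]
-- produces exactly B's slices between the remaining cut points
theorem aGo_eq_slices (cs : List Char) :
    ∀ (k j a : Nat) (acc : List (List Char)), j + k = cs.length → a ≤ j →
      aGo (cs.drop j) j acc ((cs.drop a).take (j - a)) =
        acc ++ slicesB cs (a :: (List.range' j k).filter
          (fun i => cs.getD i ' ' == '+' || (i != 0 && (cs.getD i ' ' == '-')))) := by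
  intro k
  induction k with
  | zero =>
    intro j a acc hjk ha
    have hj : j = cs.length := by omega
    have hdrop : cs.drop j = [] := by simp [hj]
    have hlen : (cs.drop a).length = j - a := by simp [hj]
    simp [hdrop, aGo, slicesB, List.take_of_length_le (le_of_eq hlen)]
  | succ k ih =>
    intro j a acc hjk ha
    have hjlt : j < cs.length := by omega
    have hdrop : cs.drop j = cs[j] :: cs.drop (j + 1) := (List.getElem_cons_drop hjlt).symm
    have hgetD : cs.getD j ' ' = cs[j] := List.getD_eq_getElem cs ' ' hjlt
    rw [hdrop, List.range'_succ, aGo]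
    by_cases hP : (j ≠ 0 ∧ cs[j] = '-') ∨ cs[j] = '+'
    · have hb : (cs.getD j ' ' == '+' || (j != 0 && (cs.getD j ' ' == '-'))) = true := by
        rcases hP with ⟨h0, hm⟩ | hp <;> simp [hgetD, *]
      have hcur : [cs[j]] = (cs.drop j).take (j + 1 - j) := by
        have h1 : j + 1 - j = 1 := by omega
        rw [h1, hdrop]
        rfl
      rw [if_pos hP, hcur, ih (j + 1) j _ (by omega) (by omega)]
      simp only [List.filter_cons, hb]
      simp [slicesB]
    · have hb : (cs.getD j ' ' == '+' || (j != 0 && (cs.getD j ' ' == '-'))) = false := by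
        have hplus : cs[j] ≠ '+' := fun h => hP (Or.inr h)
        by_cases h0 : j = 0
        · subst h0; rw [hgetD]; simp [hplus]
        · have hminus : cs[j] ≠ '-' := fun h => hP (Or.inl ⟨h0, h⟩)
          rw [hgetD]; simp [h0, hplus, hminus]
      have hcur : (cs.drop a).take (j - a) ++ [cs[j]] = (cs.drop a).take (j + 1 - a) := by
        have hidx : (cs.drop a)[j - a]? = some cs[j] := by
          rw [List.getElem?_drop]
          have : a + (j - a) = j := by omega
          rw [this, List.getElem?_eq_getElem hjlt]
        have : j + 1 - a = (j - a) + 1 := by omega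
        rw [this, List.take_succ, hidx]
        simp
      rw [if_neg hP, hcur, ih (j + 1) a acc (by omega) (by omega)]
      simp only [List.filter_cons, hb]
      simp

-- ===== VERDICT (by name: the statement is the Claim_ definition above) =====
theorem makeDataList_spec : Claim_equal_makeDataList := by
  intro s _
  show makeDataList s = makeDataList_alt s
  simp only [makeDataList, makeDataList_alt, List.range_eq_range']
  have h := aGo_eq_slices s.toList s.toList.length 0 0 [] (by omega) (le_refl 0)
  simp only [List.drop_zero, Nat.sub_zero, List.take_zero, List.nil_append] at h
  rw [h]
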